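-- pv_equiv track=rewrite | github.com/KashyapTan/Xpdite | source/mcp_integration/executors/memory_executor.py | _format_memory_listing
-- ===== SOURCE A (Python) =====
-- from collections import defaultdict
-- from typing import Any
--
-- def _format_memory_listing(memories: list[dict[str, Any]], folder: str | None) -> str:
--     if not memories:
--         if folder:
--             return f"No memories found in '{folder}'."
--         return "No memories found."
--
--     grouped: dict[str, list[dict[str, Any]]] = defaultdict(list)
--     for memory in memories:
--         grouped[memory.get("folder") or "."].append(memory)
--
--     header = "Memory listing"
--     if folder:
--         header += f" for '{folder}'"
--     lines = [f"{header}:", ""]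
--
--     for group_name in sorted(grouped):
--         display_name = group_name if group_name != "." else "(root)"
--         lines.append(f"[{display_name}]")
--         for memory in sorted(grouped[group_name], key=lambda item: item["path"]):
--             line = f"- {memory['path']} :: {memory.get('abstract', '')}"
--             if memory.get("parse_warning"):
--                 line += f" [warning: {memory['parse_warning']}]"
--             lines.append(line)
--         lines.append("")
--
--     return "\n".join(lines).strip()
-- ===== SOURCE B (Python) =====
-- def _format_memory_listing(memories: list, folder) -> str:
--     if not memories:
--         if folder:
--             return f"No memories found in '{folder}'."
--         return "No memories found."
--
--     header = "Memory listing"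
--     if folder:
--         header += f" for '{folder}'"
--     lines = [f"{header}:"]
--
--     prev = None
--     for memory in sorted(memories, key=lambda m: (m.get("folder") or ".", m["path"])):
--         group_name = memory.get("folder") or "."
--         if group_name != prev:
--             lines.append("")
--             lines.append(f"[{group_name if group_name != '.' else '(root)'}]")
--             prev = group_name
--         line = f"- {memory['path']} :: {memory.get('abstract', '')}"
--         if memory.get("parse_warning"):
--             line += f" [warning: {memory['parse_warning']}]"
--         lines.append(line)
--
--     return "\n".join(lines).strip()
-- ===== Notes on version B (the rewrite author's own statement) =====
-- stated objective: alternative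
-- what changed: Replaces A's defaultdict grouping followed by a per-group sort inside nested loops with a single stable sort of all memories on the tuple key (folder-or-'.', path) and one linear scan that emits a separator and '[folder]' header whenever the folder key changes.
import Mathlib
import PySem

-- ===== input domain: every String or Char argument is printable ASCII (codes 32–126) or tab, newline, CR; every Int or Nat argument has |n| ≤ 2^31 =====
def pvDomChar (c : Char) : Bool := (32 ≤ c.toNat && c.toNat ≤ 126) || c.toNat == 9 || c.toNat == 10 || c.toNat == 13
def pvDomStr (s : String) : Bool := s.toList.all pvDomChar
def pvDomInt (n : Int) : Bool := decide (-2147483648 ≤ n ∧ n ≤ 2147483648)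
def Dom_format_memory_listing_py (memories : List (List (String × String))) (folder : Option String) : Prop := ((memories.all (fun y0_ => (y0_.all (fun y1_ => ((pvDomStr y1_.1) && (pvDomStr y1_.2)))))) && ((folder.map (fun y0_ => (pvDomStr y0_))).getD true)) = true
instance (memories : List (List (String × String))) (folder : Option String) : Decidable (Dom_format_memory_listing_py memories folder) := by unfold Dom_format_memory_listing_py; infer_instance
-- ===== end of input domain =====

-- B replaces A's defaultdict grouping + per-group sort by ONE stable sort on the tuple key
-- (folder-or-'.', path) followed by a single scan that emits a separator + header whenever
-- the folder key changes (objective: alternative decomposition, same asymptotic cost).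

-- ===== PORT A =====
-- shared helpers: both Python versions contain these exact expressions
-- memory.get("folder") or "."
def fkeyOf (m : List (String × String)) : String :=
  match (PySem.Dict.mk m).get? "folder" with
  | none => "."
  | some s => if s = "" then "." else s

-- group_name if group_name != "." else "(root)"
def dispOf (g : String) : String := if g ≠ "." then g else "(root)"

-- memory["path"]; total via getD "" — Pre_ excludes memories without a "path" key (KeyError in A)
def pathOf (m : List (String × String)) : String := (PySem.Dict.mk m).getD "path" ""

-- f"- {memory['path']} :: {memory.get('abstract', '')}" plus the optional warning suffix
def memLine (m : List (String × String)) : String :=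
  let line := "- " ++ pathOf m ++ " :: " ++ (PySem.Dict.mk m).getD "abstract" ""
  match (PySem.Dict.mk m).get? "parse_warning" with
  | none => line
  | some w => if w = "" then line else line ++ " [warning: " ++ w ++ "]"

-- header = "Memory listing" (+ f" for '{folder}'" if folder is truthy)
def headerOf (folder : Option String) : String :=
  match folder with
  | none => "Memory listing"
  | some f => if f = "" then "Memory listing" else "Memory listing for '" ++ f ++ "'"

-- the early-return messages for empty memories
def emptyMsg (folder : Option String) : String :=
  match folder with
  | none => "No memories found."
  | some f => if f = "" then "No memories found." else "No memories found in '" ++ f ++ "'."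

-- grouped = defaultdict(list); grouped[fkey(m)].append(m)
def aGrouped (memories : List (List (String × String))) :
    PySem.Dict String (List (List (String × String))) :=
  memories.foldl (fun d m => d.modify (fkeyOf m) [] (fun l => l ++ [m])) PySem.Dict.empty

-- body of A's outer 'for group_name in sorted(grouped):' loop
def aStep (grouped : PySem.Dict String (List (List (String × String))))
    (ls : List String) (g : String) : List String :=
  let ls := ls ++ ["[" ++ dispOf g ++ "]"]
  let ls := (PySem.List.sorted (grouped.getD g []) pathOf false).foldl
      (fun ls m => ls ++ [memLine m]) ls
  ls ++ [""]

def format_memory_listing_py (memories : List (List (String × String))) (folder : Option String) : String :=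
  if memories = [] then emptyMsg folder
  else
    let grouped := aGrouped memories
    let lines := [headerOf folder ++ ":", ""]
    let lines := (PySem.List.sorted grouped.keys (fun k => k) false).foldl (aStep grouped) lines
    PySem.Str.strip (PySem.Str.join "\n" lines)

-- ===== PORT B =====
-- body of B's single 'for memory in sorted(memories, key=…):' loop
def bStep (acc : List String × Option String) (m : List (String × String)) :
    List String × Option String :=
  let g := fkeyOf m
  let acc := if some g ≠ acc.2 then (acc.1 ++ ["", "[" ++ dispOf g ++ "]"], some g) else acc
  (acc.1 ++ [memLine m], acc.2)

def format_memory_listing_py_alt (memories : List (List (String × String))) (folder : Option String) : String :=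
  if memories = [] then emptyMsg folder
  else
    let res := (PySem.List.sorted2 memories fkeyOf pathOf false).foldl bStep
        ([headerOf folder ++ ":"], none)
    PySem.Str.strip (PySem.Str.join "\n" res.1)

-- ===== PRECONDITION & SPEC =====
-- Pre_ excludes exactly the inputs where Python A raises KeyError: a non-empty listing
-- containing a memory without a "path" key (the empty listing returns early, so it is admitted).
def Pre_format_memory_listing_py (memories : List (List (String × String))) (folder : Option String) : Prop :=
  ∀ m ∈ memories, (PySem.Dict.mk m).contains "path" = true
instance (memories : List (List (String × String))) (folder : Option String) : Decidable (Pre_format_memory_listing_py memories folder) := by unfold Pre_format_memory_listing_py; infer_instance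

def pvWitness_format_memory_listing_py : (List (List (String × String))) × Option String :=
  ([[("path", "a.md"), ("abstract", "notes")], [("path", "b.md"), ("folder", "docs")]], some "docs")

def Spec_format_memory_listing_py (memories : List (List (String × String))) (folder : Option String) (out : String) : Prop := out = format_memory_listing_py_alt memories folder
instance (memories : List (List (String × String))) (folder : Option String) (out : String) : Decidable (Spec_format_memory_listing_py memories folder out) := by unfold Spec_format_memory_listing_py; infer_instance

-- ===== CLAIM (what is proved, stated in full; the proofs are below) =====
def Claim_equal_format_memory_listing_py : Prop := ∀ (memories : List (List (String × String))) (folder : Option String), Dom_format_memory_listing_py memories folder → Pre_format_memory_listing_py memories folder → Spec_format_memory_listing_py memories folder (format_memory_listing_py memories folder)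

-- ===== LEMMAS AND PROOFS =====

-- insertBy mechanics ---------------------------------------------------------
lemma insertBy_nil {α : Type} (bef : α → α → Bool) (x : α) :
    PySem.List.insertBy bef x [] = [x] := by simp [PySem.List.insertBy]

lemma insertBy_cons {α : Type} (bef : α → α → Bool) (x y : α) (ys : List α) :
    PySem.List.insertBy bef x (y :: ys) =
      if bef x y then x :: y :: ys else y :: PySem.List.insertBy bef x ys := by
  simp [PySem.List.insertBy]

lemma insertBy_all_before {α : Type} (bef : α → α → Bool) (x : α) (ys : List α)
    (h : ∀ y ∈ ys, bef x y = true) : PySem.List.insertBy bef x ys = x :: ys := by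
  cases ys with
  | nil => simp [insertBy_nil]
  | cons y ys => rw [insertBy_cons, h y (by simp), if_pos rfl]

lemma insertBy_append_not {α : Type} (bef : α → α → Bool) (x : α) (A B : List α)
    (h : ∀ a ∈ A, bef x a = false) :
    PySem.List.insertBy bef x (A ++ B) = A ++ PySem.List.insertBy bef x B := by
  induction A with
  | nil => simp
  | cons a A ih =>
    rw [List.cons_append, insertBy_cons, h a (by simp), if_neg (by simp),
      ih (fun a ha => h a (by simp [ha])), List.cons_append]

lemma insertBy_split {α : Type} (bef bef' : α → α → Bool) (x : α) (G R : List α)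
    (h1 : ∀ a ∈ G, bef x a = bef' x a) (h2 : ∀ b ∈ R, bef x b = true) :
    PySem.List.insertBy bef x (G ++ R) = PySem.List.insertBy bef' x G ++ R := by
  induction G with
  | nil => simp [insertBy_all_before bef x R h2, insertBy_nil]
  | cons a G ih =>
    rw [List.cons_append, insertBy_cons, insertBy_cons, h1 a (by simp),
      ih (fun a ha => h1 a (by simp [ha]))]
    by_cases hb : bef' x a = true
    · simp [hb]
    · simp [hb]

-- sorted / sorted2 as repeated insertion -------------------------------------
lemma sorted_append_singleton {α κ : Type} [LT κ] [DecidableLT κ]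
    (xs : List α) (x : α) (key : α → κ) :
    PySem.List.sorted (xs ++ [x]) key false =
      PySem.List.insertBy (fun a b => decide (key a < key b)) x (PySem.List.sorted xs key false) := by
  rw [PySem.List.sorted_eq_foldl_insertBy, PySem.List.sorted_eq_foldl_insertBy, List.foldl_append]
  rfl

lemma sorted2_append_singleton {α : Type}
    (xs : List α) (x : α) (k1 k2 : α → String) :
    PySem.List.sorted2 (xs ++ [x]) k1 k2 false =
      PySem.List.insertBy
        (fun a b => decide (k1 a < k1 b) || (!decide (k1 b < k1 a) && decide (k2 a < k2 b)))
        x (PySem.List.sorted2 xs k1 k2 false) := by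
  simp [PySem.List.sorted2, List.foldl_append]

-- inserting one element into a concatenation of folder groups ----------------
lemma ins_groups {α : Type} (k1 k2 : α → String) (xs : List α) (x : α) :
    ∀ (K : List String), K.Pairwise (· < ·) → k1 x ∈ K →
    PySem.List.insertBy
        (fun a b => decide (k1 a < k1 b) || (!decide (k1 b < k1 a) && decide (k2 a < k2 b)))
        x (K.flatMap (fun g => PySem.List.sorted (xs.filter (fun y => k1 y == g)) k2 false))
      = K.flatMap (fun g => PySem.List.sorted ((xs ++ [x]).filter (fun y => k1 y == g)) k2 false) := by
  intro K
  induction K with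
  | nil => intro _ hx; simp at hx
  | cons g K ih =>
    intro hK hx
    have hgK : ∀ g' ∈ K, g < g' := fun g' h' => (List.pairwise_cons.1 hK).1 g' h'
    rw [List.flatMap_cons, List.flatMap_cons]
    by_cases hg : k1 x = g
    · -- x belongs to the first group: insert it there by the path key
      have hG : ∀ a ∈ PySem.List.sorted (xs.filter (fun y => k1 y == g)) k2 false,
          (decide (k1 x < k1 a) || (!decide (k1 a < k1 x) && decide (k2 x < k2 a)))
            = decide (k2 x < k2 a) := by
        intro a ha
        rw [PySem.List.mem_sorted] at ha
        have hka : k1 a = g := by simpa using (List.mem_filter.1 ha).2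
        simp [hka, hg]
      have hR : ∀ b ∈ K.flatMap
            (fun g' => PySem.List.sorted (xs.filter (fun y => k1 y == g')) k2 false),
          (decide (k1 x < k1 b) || (!decide (k1 b < k1 x) && decide (k2 x < k2 b))) = true := by
        intro b hb
        obtain ⟨g', hg', hbg⟩ := List.mem_flatMap.1 hb
        rw [PySem.List.mem_sorted] at hbg
        have hkb : k1 b = g' := by simpa using (List.mem_filter.1 hbg).2
        have : k1 x < k1 b := by rw [hg, hkb]; exact hgK g' hg'
        simp [this]
      rw [insertBy_split _ (fun a b => decide (k2 a < k2 b)) x _ _ hG hR,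
        ← sorted_append_singleton]
      have h1 : (xs ++ [x]).filter (fun y => k1 y == g)
          = xs.filter (fun y => k1 y == g) ++ [x] := by
        simp [List.filter_append, hg]
      have h2 : K.flatMap (fun g' => PySem.List.sorted ((xs ++ [x]).filter (fun y => k1 y == g')) k2 false)
          = K.flatMap (fun g' => PySem.List.sorted (xs.filter (fun y => k1 y == g')) k2 false) := by
        apply List.flatMap_congr
        intro g' hg'
        have : k1 x ≠ g' := by rw [hg]; exact ne_of_lt (hgK g' hg')
        simp [List.filter_append, this]
      rw [h1, h2]
    · -- x belongs to a later group: skip the first group untouched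
      have hxK : k1 x ∈ K := by
        rcases List.mem_cons.1 hx with h | h
        · exact absurd h hg
        · exact h
      have hglt : g < k1 x := hgK _ hxK
      have hGf : ∀ a ∈ PySem.List.sorted (xs.filter (fun y => k1 y == g)) k2 false,
          (decide (k1 x < k1 a) || (!decide (k1 a < k1 x) && decide (k2 x < k2 a))) = false := by
        intro a ha
        rw [PySem.List.mem_sorted] at ha
        have hka : k1 a = g := by simpa using (List.mem_filter.1 ha).2
        have h1 : ¬ (k1 x < k1 a) := by rw [hka]; exact not_lt.2 hglt.le
        have h2 : k1 a < k1 x := by rw [hka]; exact hglt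
        simp [h1, h2]
      rw [insertBy_append_not _ _ _ _ hGf, ih (List.pairwise_cons.1 hK).2 hxK]
      have h1 : (xs ++ [x]).filter (fun y => k1 y == g) = xs.filter (fun y => k1 y == g) := by
        simp [List.filter_append, hg]
      rw [h1]

-- the one-pass tuple sort IS group-by-folder then sort-by-path ---------------
lemma sorted2_groups {α : Type} (k1 k2 : α → String) :
    ∀ (xs : List α) (K : List String), K.Pairwise (· < ·) → (∀ y ∈ xs, k1 y ∈ K) →
    PySem.List.sorted2 xs k1 k2 false
      = K.flatMap (fun g => PySem.List.sorted (xs.filter (fun y => k1 y == g)) k2 false) := by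
  intro xs
  induction xs using List.reverseRecOn with
  | nil =>
    intro K _ _
    simp [PySem.List.sorted2]
    intro x _
    rfl
  | append_singleton xs x ih =>
    intro K hK hmem
    rw [sorted2_append_singleton, ih K hK (fun y hy => hmem y (by simp [hy])),
      ins_groups k1 k2 xs x K hK (hmem x (by simp))]

-- B's scan over one folder group after the header was emitted ----------------
lemma scan_group : ∀ (G : List (List (String × String))) (g : String) (ls : List String),
    (∀ m ∈ G, fkeyOf m = g) →
    G.foldl bStep (ls, some g) = (ls ++ G.map memLine, some g) := by
  intro G
  induction G with
  | nil => intro g ls _; simp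
  | cons m G ih =>
    intro g ls h
    have hm : fkeyOf m = g := h m (by simp)
    have hstep : bStep (ls, some g) m = (ls ++ [memLine m], some g) := by
      simp [bStep, hm]
    rw [List.foldl_cons, hstep, ih g _ (fun m' hm' => h m' (by simp [hm']))]
    simp

-- B's scan over the whole concatenation of groups ----------------------------
lemma scan_blocks (Ms : String → List (List (String × String))) :
    ∀ (K : List String) (ls : List String) (p : Option String),
    K.Pairwise (· < ·) →
    (∀ g ∈ K, ∀ m ∈ Ms g, fkeyOf m = g) →
    (∀ g ∈ K, p ≠ some g) →
    (∀ g ∈ K, Ms g ≠ []) →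
    (K.flatMap Ms).foldl bStep (ls, p)
      = (ls ++ K.flatMap (fun g => "" :: ("[" ++ dispOf g ++ "]") :: (Ms g).map memLine),
         K.foldl (fun _ g => some g) p) := by
  intro K
  induction K with
  | nil => intro ls p _ _ _ _; simp
  | cons g K ih =>
    intro ls p hK hfk hp hne
    obtain ⟨m, G, hMg⟩ : ∃ m G, Ms g = m :: G := by
      cases hMs : Ms g with
      | nil => exact absurd hMs (hne g (by simp))
      | cons m G => exact ⟨m, G, rfl⟩
    have hm : fkeyOf m = g := hfk g (by simp) m (by rw [hMg]; simp)
    have hstep : bStep (ls, p) m = (ls ++ ["", "[" ++ dispOf g ++ "]", memLine m], some g) := by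
      have hgp : ¬ (some g = p) := fun h => hp g (by simp) h.symm
      simp [bStep, hm, hgp]
    rw [List.flatMap_cons, List.foldl_append, hMg, List.foldl_cons, hstep,
      scan_group G g _ (fun m' hm' => hfk g (by simp) m' (by rw [hMg]; simp [hm'])),
      ih _ (some g) (List.pairwise_cons.1 hK).2
        (fun g' h' => hfk g' (by simp [h']))
        (fun g' h' heq => ne_of_lt ((List.pairwise_cons.1 hK).1 g' h') (Option.some_injective _ heq))
        (fun g' h' => hne g' (by simp [h']))]
    simp [hMg]

-- A's outer loop as a flatMap ------------------------------------------------
lemma aStep_lines (grouped : PySem.Dict String (List (List (String × String)))) :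
    ∀ (K : List String) (ls : List String),
    K.foldl (aStep grouped) ls
      = ls ++ K.flatMap (fun g =>
          ("[" ++ dispOf g ++ "]") ::
            ((PySem.List.sorted (grouped.getD g []) pathOf false).map memLine ++ [""])) := by
  intro K
  induction K with
  | nil => intro ls; simp
  | cons g K ih =>
    intro ls
    have hstep : aStep grouped ls g
        = ls ++ (("[" ++ dispOf g ++ "]") ::
            ((PySem.List.sorted (grouped.getD g []) pathOf false).map memLine ++ [""])) := by
      simp only [aStep]
      rw [PySem.List.foldl_append_singleton_eq_map]
      simp
    rw [List.foldl_cons, hstep, ih]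
    simp

-- moving the blank separator from after each block to before it --------------
lemma interleave_blank {β : Type} (f : β → List String) :
    ∀ (K : List β),
    "" :: K.flatMap (fun g => f g ++ [""]) = K.flatMap (fun g => "" :: f g) ++ [""] := by
  intro K
  induction K with
  | nil => simp
  | cons g K ih => simp [← ih]

-- join / strip tail ----------------------------------------------------------
lemma join_append_nil (sep : List Char) :
    ∀ (L : List (List Char)), L ≠ [] →
    PySem.Chars.join sep (L ++ [[]]) = PySem.Chars.join sep L ++ sep := by
  intro L hL
  induction L with
  | nil => exact absurd rfl hL
  | cons x L ih =>
    cases L with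
    | nil => simp [PySem.Chars.join, List.intercalate, List.intersperse]
    | cons y t =>
      have h2 : ∀ (a b : List Char) (r : List (List Char)),
          PySem.Chars.join sep (a :: b :: r) = a ++ sep ++ PySem.Chars.join sep (b :: r) := by
        intro a b r; simp [PySem.Chars.join, List.intercalate, List.intersperse]
      rw [show (x :: y :: t) ++ [[]] = x :: y :: (t ++ [[]]) from by simp, h2,
        show y :: (t ++ [[]]) = (y :: t) ++ [[]] from by simp, ih (by simp), h2 x y t]
      simp

lemma strip_append_newline (cs : List Char) :
    PySem.Chars.strip (cs ++ ['\n']) = PySem.Chars.strip cs := by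
  have hr : ∀ (D : List Char), PySem.Chars.rstrip (D ++ ['\n']) = PySem.Chars.rstrip D := by
    intro D
    simp [PySem.Chars.rstrip, show PySem.Chars.isspace '\n' = true from by decide]
  unfold PySem.Chars.strip PySem.Chars.lstrip
  rw [List.dropWhile_append]
  by_cases he : (List.dropWhile PySem.Chars.isspace cs).isEmpty = true
  · rw [if_pos he]
    rw [List.isEmpty_iff.1 he]
    simp [PySem.Chars.rstrip, show PySem.Chars.isspace '\n' = true from by decide]
  · rw [if_neg he, hr]

-- the grouped dict, characterised --------------------------------------------
lemma aGrouped_keys (memories : List (List (String × String))) :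
    (aGrouped memories).keys = PySem.Set.ofList (memories.map fkeyOf) := by
  unfold aGrouped
  rw [PySem.Dict.keys_foldl_modify_key memories fkeyOf
    ([] : List (List (String × String))) (fun _ m => fun l => l ++ [m]) PySem.Dict.empty]
  simp [PySem.Dict.keys_empty, PySem.Set.ofList, PySem.Set.update]

lemma aGrouped_getD (memories : List (List (String × String))) (g : String) :
    (aGrouped memories).getD g [] = memories.filter (fun m => fkeyOf m == g) := by
  unfold aGrouped
  have h := PySem.Dict.getD_foldl_modify_append
    (memories.map (fun m => (fkeyOf m, m))) PySem.Dict.empty g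
  rw [List.foldl_map] at h
  simp only [List.filter_map] at h
  rw [h]
  simp [Function.comp_def]

-- lifting the Chars-level tail lemma to the two final strings ----------------
lemma strip_join_blank (lB : List String) (h : lB ≠ []) :
    PySem.Str.strip (PySem.Str.join "\n" (lB ++ [""]))
      = PySem.Str.strip (PySem.Str.join "\n" lB) := by
  simp only [PySem.Str.strip, PySem.Str.join, String.toList_ofList]
  rw [List.map_append, show (([""] : List String).map String.toList) = [[]] from rfl,
    join_append_nil _ _ (by simp [h]),
    show ("\n" : String).toList = ['\n'] from rfl, strip_append_newline]

-- ===== VERDICT (by name: the statement is the Claim_ definition above) =====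
theorem format_memory_listing_py_spec : Claim_equal_format_memory_listing_py := by
  intro memories folder _ _
  unfold Spec_format_memory_listing_py
  by_cases hempty : memories = []
  · simp [format_memory_listing_py, format_memory_listing_py_alt, hempty]
  · set K := PySem.List.sorted (PySem.Set.ofList (memories.map fkeyOf)) (fun k => k) false
      with hKdef
    have hKpair : K.Pairwise (· < ·) := PySem.List.sorted_ofList_pairwise_lt _
    have hKmem : ∀ y ∈ memories, fkeyOf y ∈ K := by
      intro y hy
      rw [hKdef, PySem.List.mem_sorted, PySem.Set.mem_ofList]
      exact List.mem_map_of_mem hy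
    have hfk : ∀ g ∈ K, ∀ m ∈ PySem.List.sorted (memories.filter (fun y => fkeyOf y == g)) pathOf false,
        fkeyOf m = g := by
      intro g _ m hm
      rw [PySem.List.mem_sorted] at hm
      simpa using (List.mem_filter.1 hm).2
    have hne : ∀ g ∈ K,
        PySem.List.sorted (memories.filter (fun y => fkeyOf y == g)) pathOf false ≠ [] := by
      intro g hg
      rw [hKdef, PySem.List.mem_sorted, PySem.Set.mem_ofList] at hg
      obtain ⟨y, hy, hyg⟩ := List.mem_map.1 hg
      rw [Ne, PySem.List.sorted_eq_nil_iff]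
      exact List.ne_nil_of_mem (List.mem_filter.2 ⟨hy, by simp [hyg]⟩)
    have hB : format_memory_listing_py_alt memories folder
        = PySem.Str.strip (PySem.Str.join "\n"
            ((headerOf folder ++ ":") :: K.flatMap (fun g =>
              "" :: ("[" ++ dispOf g ++ "]") ::
                (PySem.List.sorted (memories.filter (fun y => fkeyOf y == g)) pathOf false).map memLine))) := by
      simp only [format_memory_listing_py_alt, if_neg hempty]
      rw [sorted2_groups fkeyOf pathOf memories K hKpair hKmem,
        scan_blocks _ K _ none hKpair hfk (by simp) hne]
      simp
    have hA : format_memory_listing_py memories folder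
        = PySem.Str.strip (PySem.Str.join "\n"
            (((headerOf folder ++ ":") :: K.flatMap (fun g =>
              "" :: ("[" ++ dispOf g ++ "]") ::
                (PySem.List.sorted (memories.filter (fun y => fkeyOf y == g)) pathOf false).map memLine))
              ++ [""])) := by
      simp only [format_memory_listing_py, if_neg hempty]
      rw [aGrouped_keys, ← hKdef, aStep_lines]
      simp only [aGrouped_getD]
      have hshape := interleave_blank (fun g => ("[" ++ dispOf g ++ "]") ::
        (PySem.List.sorted (memories.filter (fun y => fkeyOf y == g)) pathOf false).map memLine) K
      simp only [List.cons_append] at hshape ⊢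
      simp [← hshape]
    rw [hA, hB, strip_join_blank _ (by simp)]
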